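-- pv_equiv track=rewrite | github.com/AntonGust/Project-Violet-2.0 | Cowrie/cowrie-src/src/cowrie/commands/mysql.py | _format_table_result
-- ===== SOURCE A (Python) =====
-- def _format_table_result(columns: list[str], rows: list[list[str]]) -> str:
--     """Format a MySQL-style ASCII table from columns and rows."""
--     # Calculate column widths
--     widths = [len(c) for c in columns]
--     for row in rows:
--         for i, val in enumerate(row):
--             if i < len(widths):
--                 widths[i] = max(widths[i], len(val))
--
--     # Build separator
--     sep = "+" + "+".join("-" * (w + 2) for w in widths) + "+"
--
--     lines = [sep]
--     # Header
--     header = "|" + "|".join(f" {c:<{widths[i]}} " for i, c in enumerate(columns)) + "|"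
--     lines.append(header)
--     lines.append(sep)
--     # Data rows
--     for row in rows:
--         cells = []
--         for i, w in enumerate(widths):
--             val = row[i] if i < len(row) else ""
--             cells.append(f" {val:<{w}} ")
--         lines.append("|" + "|".join(cells) + "|")
--     lines.append(sep)
--     lines.append(f"{len(rows)} {'row' if len(rows) == 1 else 'rows'} in set (0.00 sec)")
--     return "\n".join(lines)
-- ===== SOURCE B (Python) =====
-- def _format_table_result(columns: list[str], rows: list[list[str]]) -> str:
--     """Format a MySQL-style ASCII table from columns and rows."""
--     # Column-major strategy: render each COLUMN as a complete vertical block of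
--     # already-padded cells (dash, header, dash, data cells..., dash), then
--     # transpose the blocks into output lines, choosing '+' or '|' glue per line.
--     blocks = []
--     for j, name in enumerate(columns):
--         cells = [name] + [r[j] if j < len(r) else "" for r in rows]
--         w = max(len(c) for c in cells)
--         dash = "-" * (w + 2)
--         padded = [f" {c:<{w}} " for c in cells]
--         blocks.append([dash, padded[0], dash] + padded[1:] + [dash])
--     m = len(rows) + 4
--     out = []
--     for i in range(m):
--         d = "+" if i in (0, 2, m - 1) else "|"
--         out.append(d + d.join(b[i] for b in blocks) + d)
--     n = len(rows)
--     out.append(f"{n} {'row' if n == 1 else 'rows'} in set (0.00 sec)")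
--     return "\n".join(out)
-- ===== Notes on version B (the rewrite author's own statement) =====
-- stated objective: alternative
-- what changed: B renders the table column-major: for each column it builds one complete vertical block of already-padded cells (separator dash, header, separator dash, data cells, separator dash), then transposes the blocks into output lines with '+' or '|' glue chosen per line index, instead of A's row-major rendering with a mutated widths array and separate sep/header/row code paths.
import Mathlib
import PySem

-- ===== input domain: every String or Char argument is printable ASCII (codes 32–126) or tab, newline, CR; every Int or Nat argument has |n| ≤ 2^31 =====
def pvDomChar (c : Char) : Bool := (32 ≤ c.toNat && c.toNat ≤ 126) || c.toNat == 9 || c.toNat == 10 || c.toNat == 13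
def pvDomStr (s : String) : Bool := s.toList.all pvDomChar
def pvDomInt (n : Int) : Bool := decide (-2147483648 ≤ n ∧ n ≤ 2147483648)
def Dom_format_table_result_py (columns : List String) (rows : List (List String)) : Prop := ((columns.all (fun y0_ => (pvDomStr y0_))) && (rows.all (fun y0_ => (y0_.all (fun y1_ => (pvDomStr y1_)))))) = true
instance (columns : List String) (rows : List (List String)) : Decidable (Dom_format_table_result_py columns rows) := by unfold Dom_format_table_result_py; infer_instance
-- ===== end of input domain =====

-- B builds the table column-major (one padded block per column, then transposes blocks into lines); same output as A's row-major rendering.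

-- ===== PORT A =====
-- f" {val:<{w}} "  (left-justify to width w between two spaces); exact for len = character count
def pvA_cell (cs : List Char) (w : Nat) : List Char :=
  [' '] ++ (cs ++ List.replicate (w - cs.length) ' ') ++ [' ']

-- 'for i, val in enumerate(row): if i < len(widths): widths[i] = max(widths[i], len(val))'
def pvA_upd : List Nat → List String → Nat → List Nat
  | ws, [], _ => ws
  | ws, v :: rest, i =>
      pvA_upd (if i < ws.length then ws.set i (max (ws.getD i 0) v.toList.length) else ws) rest (i + 1)

def pvA_widths (columns : List String) (rows : List (List String)) : List Nat :=
  rows.foldl (fun ws row => pvA_upd ws row 0) (columns.map (fun c => c.toList.length))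

def pvA_header (columns : List String) (widths : List Nat) : List Char :=
  ['|'] ++ PySem.Chars.join ['|']
    ((columns.zipIdx).map (fun p => pvA_cell p.1.toList (widths.getD p.2 0))) ++ ['|']

-- 'val = row[i] if i < len(row) else ""' then cells.append(f" {val:<{w}} ")
def pvA_rowline (widths : List Nat) (row : List String) : List Char :=
  ['|'] ++ PySem.Chars.join ['|']
    ((widths.zipIdx).map (fun p =>
      pvA_cell (if p.2 < row.length then (row.getD p.2 "").toList else []) p.1)) ++ ['|']

def format_table_result_py (columns : List String) (rows : List (List String)) : String :=
  let widths := pvA_widths columns rows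
  let sep := ['+'] ++ PySem.Chars.join ['+'] (widths.map (fun w => List.replicate (w + 2) '-')) ++ ['+']
  let lines := [sep]
  let lines := lines ++ [pvA_header columns widths]
  let lines := lines ++ [sep]
  let lines := rows.foldl (fun acc row => acc ++ [pvA_rowline widths row]) lines
  let lines := lines ++ [sep]
  let lines := lines ++ [PySem.Int.toChars (rows.length : Int) ++ [' '] ++
      (if rows.length == 1 then "row".toList else "rows".toList) ++ " in set (0.00 sec)".toList]
  String.ofList (PySem.Chars.join ['\n'] lines)

-- ===== PORT B =====
-- f" {c:<{w}} "
def pvB_cell (cs : List Char) (w : Nat) : List Char :=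
  [' '] ++ (cs ++ List.replicate (w - cs.length) ' ') ++ [' ']

-- w = max(len(c) for c in cells)  (cells nonempty in B)
def pvB_width (cells : List (List Char)) : Nat :=
  (PySem.List.max? (cells.map List.length) (fun x => x)).getD 0

-- one column rendered vertically: dash, padded header, dash, padded data cells…, dash
def pvB_block (name : List Char) (col : List (List Char)) : List (List Char) :=
  let cells := name :: col
  let w := pvB_width cells
  let dash := List.replicate (w + 2) '-'
  let padded := cells.map (fun c => pvB_cell c w)
  [dash, padded.headD [], dash] ++ padded.drop 1 ++ [dash]

-- 'd + d.join(b[i] for b in blocks) + d' with d chosen by the line index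
def pvB_lineAt (blocks : List (List (List Char))) (m i : Nat) : List Char :=
  let d : Char := if i = 0 ∨ i = 2 ∨ i = m - 1 then '+' else '|'
  [d] ++ PySem.Chars.join [d] (blocks.map (fun b => b.getD i [])) ++ [d]

def format_table_result_py_alt (columns : List String) (rows : List (List String)) : String :=
  let blocks := (columns.zipIdx).map (fun p =>
    pvB_block p.1.toList (rows.map (fun r => (r.map String.toList).getD p.2 [])))
  let m := rows.length + 4
  let out := (List.range m).map (pvB_lineAt blocks m)
  let footer := PySem.Int.toChars (rows.length : Int) ++ [' '] ++
      (if rows.length == 1 then "row".toList else "rows".toList) ++ " in set (0.00 sec)".toList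
  String.ofList (PySem.Chars.join ['\n'] (out ++ [footer]))

-- ===== PRECONDITION & SPEC =====
def Spec_format_table_result_py (columns : List String) (rows : List (List String)) (out : String) : Prop := out = format_table_result_py_alt columns rows
instance (columns : List String) (rows : List (List String)) (out : String) : Decidable (Spec_format_table_result_py columns rows out) := by unfold Spec_format_table_result_py; infer_instance

-- ===== CLAIM (what is proved, stated in full; the proofs are below) =====
def Claim_equal_format_table_result_py : Prop := ∀ (columns : List String) (rows : List (List String)), Dom_format_table_result_py columns rows → Spec_format_table_result_py columns rows (format_table_result_py columns rows)

-- ===== LEMMAS AND PROOFS =====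

-- the j-th column of the data, as B extracts it
def pvCol (rows : List (List String)) (j : Nat) : List (List Char) :=
  rows.map (fun r => (r.map String.toList).getD j [])

theorem pvA_upd_getD (row : List String) : ∀ (ws : List Nat) (i j : Nat),
    (pvA_upd ws row i).getD j 0 =
      max (ws.getD j 0)
        (if i ≤ j ∧ j < ws.length then (row.map (fun s => s.toList.length)).getD (j - i) 0 else 0) := by
  induction row with
  | nil => intro ws i j; simp [pvA_upd]
  | cons v rest ih =>
      intro ws i j
      simp only [pvA_upd]
      rw [ih]
      by_cases hj : j < ws.length
      · by_cases hij : i = j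
        · subst hij
          rw [if_pos hj]
          have h1 : (ws.set i (max (ws.getD i 0) v.toList.length)).getD i 0
              = max (ws.getD i 0) v.toList.length := by
            simp [List.getD_eq_getElem?_getD, hj]
          rw [h1]
          have h2 : ¬ (i + 1 ≤ i) := by omega
          simp [h2, hj]
        · have hset : ∀ (x : Nat), (ws.set i x).getD j 0 = ws.getD j 0 := by
            intro x
            simp [List.getD_eq_getElem?_getD, List.getElem?_set_ne hij]
          have hlen : (if i < ws.length then ws.set i (max (ws.getD i 0) v.toList.length) else ws).getD j 0 = ws.getD j 0 := by
            split
            · exact hset _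
            · rfl
          have hlen2 : (if i < ws.length then ws.set i (max (ws.getD i 0) v.toList.length) else ws).length = ws.length := by
            split <;> simp
          rw [hlen, hlen2]
          by_cases hle : i ≤ j
          · have hlt : i + 1 ≤ j := by omega
            have : j - i = (j - (i+1)) + 1 := by omega
            simp [hle, hlt, hj, this]
          · have : ¬ (i + 1 ≤ j) := by omega
            simp [hle, this]
      · have hlen2 : (if i < ws.length then ws.set i (max (ws.getD i 0) v.toList.length) else ws).length = ws.length := by
          split <;> simp
        have hg : ∀ (l : List Nat), l.length = ws.length → l.getD j 0 = 0 := by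
          intro l hl
          have : l.length ≤ j := by omega
          simp [List.getD_eq_getElem?_getD, List.getElem?_eq_none this]
        rw [hg _ hlen2, hg ws rfl, hlen2]
        simp [hj]

theorem pvA_upd_length (row : List String) : ∀ (ws : List Nat) (i : Nat),
    (pvA_upd ws row i).length = ws.length := by
  induction row with
  | nil => intro ws i; simp [pvA_upd]
  | cons v rest ih =>
      intro ws i
      simp only [pvA_upd]
      rw [ih]
      split <;> simp

theorem pvA_widths_fold (rows : List (List String)) : ∀ (ws : List Nat) (j : Nat), j < ws.length →
    (rows.foldl (fun ws row => pvA_upd ws row 0) ws).getD j 0 =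
      (rows.map (fun r => (r.map (fun s => s.toList.length)).getD j 0)).foldl max (ws.getD j 0) := by
  induction rows with
  | nil => intro ws j h; simp
  | cons r rest ih =>
      intro ws j h
      simp only [List.foldl_cons, List.map_cons]
      rw [ih _ j (by rw [pvA_upd_length]; exact h)]
      rw [pvA_upd_getD]
      rw [if_pos ⟨Nat.zero_le _, h⟩]
      simp

theorem pv_foldl_upd_length (rows : List (List String)) : ∀ (ws : List Nat),
    (rows.foldl (fun ws row => pvA_upd ws row 0) ws).length = ws.length := by
  induction rows with
  | nil => intro ws; simp
  | cons r rest ih => intro ws; simp only [List.foldl_cons]; rw [ih, pvA_upd_length]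

theorem pvA_widths_length (columns : List String) (rows : List (List String)) :
    (pvA_widths columns rows).length = columns.length := by
  unfold pvA_widths; rw [pv_foldl_upd_length]; simp

theorem pv_zipIdx_map_eq_range {α β : Type} (d : α) (g : α × Nat → β) :
    ∀ (xs : List α) (k : Nat),
      (xs.zipIdx k).map g =
        (List.range xs.length).map (fun j => g (xs.getD j d, j + k)) := by
  intro xs
  induction xs with
  | nil => intro k; simp
  | cons x t ih =>
      intro k
      simp only [List.zipIdx_cons, List.map_cons, List.length_cons, List.range_succ_eq_map,
        List.map_map]
      rw [ih]
      congr 1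
      · simp
      · congr 1
        funext j
        simp only [Function.comp_apply, List.getD_cons_succ]
        have : j + (k + 1) = j + 1 + k := by omega
        rw [this]

theorem pv_map_eq_range {α β : Type} (d : α) (g : α → β) :
    ∀ (xs : List α), xs.map g = (List.range xs.length).map (fun j => g (xs.getD j d)) := by
  intro xs
  induction xs with
  | nil => simp
  | cons x t ih =>
      simp only [List.map_cons, List.length_cons, List.range_succ_eq_map, List.map_map]
      rw [ih]
      simp [Function.comp]

theorem pv_getD_map_lt {α β : Type} (f : α → β) (xs : List α) (j : Nat) (d : α) (d' : β)
    (h : j < xs.length) : (xs.map f).getD j d' = f (xs.getD j d) := by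
  simp [List.getD_eq_getElem?_getD, List.getElem?_map, List.getElem?_eq_getElem h]

theorem pv_len_getD (r : List String) : ∀ (j : Nat),
    ((r.map String.toList).getD j []).length = (r.map (fun s => s.toList.length)).getD j 0 := by
  induction r with
  | nil => intro j; simp
  | cons v rest ih =>
      intro j
      cases j with
      | zero => simp
      | succ m => simp only [List.map_cons, List.getD_cons_succ]; exact ih m

-- B's per-column width agrees with A's mutated widths array
theorem pv_width_eq (columns : List String) (rows : List (List String)) (j : Nat)
    (hj : j < columns.length) :
    pvB_width ((columns.getD j "").toList :: pvCol rows j) = (pvA_widths columns rows).getD j 0 := by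
  unfold pvB_width pvCol pvA_widths
  rw [pvA_widths_fold rows _ j (by simpa using hj)]
  simp only [List.map_cons, PySem.List.max?_id_cons, Option.getD_some, List.map_map]
  have hinit : (columns.map (fun c => c.toList.length)).getD j 0
      = (columns.getD j "").toList.length := by
    rw [pv_getD_map_lt (fun c => c.toList.length) columns j "" 0 hj]
  rw [hinit]
  congr 1
  apply List.map_congr_left
  intro r _
  simp only [Function.comp_apply]
  exact pv_len_getD r j

-- the rendered blocks, in range form
theorem pv_blocks_range (columns : List String) (rows : List (List String)) :
    (columns.zipIdx).map (fun p =>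
        pvB_block p.1.toList (rows.map (fun r => (r.map String.toList).getD p.2 []))) =
      (List.range columns.length).map (fun j =>
        pvB_block (columns.getD j "").toList (pvCol rows j)) := by
  rw [pv_zipIdx_map_eq_range "" _ columns 0]
  simp [pvCol]

theorem pvB_block_expand (name : List Char) (col : List (List Char)) :
    pvB_block name col =
      List.replicate (pvB_width (name :: col) + 2) '-' ::
      pvB_cell name (pvB_width (name :: col)) ::
      List.replicate (pvB_width (name :: col) + 2) '-' ::
      (col.map (fun c => pvB_cell c (pvB_width (name :: col))) ++
        [List.replicate (pvB_width (name :: col) + 2) '-']) := by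
  simp [pvB_block]

theorem pvB_block_getD_data (name : List Char) (col : List (List Char)) (k : Nat)
    (hk : k < col.length) :
    (pvB_block name col).getD (3 + k) [] =
      pvB_cell (col.getD k []) (pvB_width (name :: col)) := by
  rw [pvB_block_expand]
  have h3 : 3 + k = k + 3 := by omega
  rw [h3]
  simp only [List.getD_cons_succ]
  rw [List.getD_eq_getElem?_getD, List.getElem?_append_left (by simpa using hk)]
  rw [← List.getD_eq_getElem?_getD]
  exact pv_getD_map_lt _ col k [] [] hk

theorem pvB_block_getD_last (name : List Char) (col : List (List Char)) :
    (pvB_block name col).getD (3 + col.length) [] =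
      List.replicate (pvB_width (name :: col) + 2) '-' := by
  rw [pvB_block_expand]
  have h3 : 3 + col.length = col.length + 3 := by omega
  rw [h3]
  simp only [List.getD_cons_succ]
  rw [List.getD_eq_getElem?_getD, List.getElem?_append_right (by simp)]
  simp

theorem pv_header_range (columns : List String) (W : List Nat) :
    pvA_header columns W =
      ['|'] ++ PySem.Chars.join ['|']
        ((List.range columns.length).map (fun j =>
          pvB_cell (columns.getD j "").toList (W.getD j 0))) ++ ['|'] := by
  unfold pvA_header
  rw [pv_zipIdx_map_eq_range "" _ columns 0]
  rfl

theorem pv_rowline_range (W : List Nat) (row : List String) :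
    pvA_rowline W row =
      ['|'] ++ PySem.Chars.join ['|']
        ((List.range W.length).map (fun j =>
          pvB_cell ((row.map String.toList).getD j []) (W.getD j 0))) ++ ['|'] := by
  unfold pvA_rowline
  rw [pv_zipIdx_map_eq_range 0 _ W 0]
  congr 2
  congr 1
  apply List.map_congr_left
  intro j hj
  rw [List.mem_range] at hj
  by_cases hr : j < row.length
  · rw [pv_getD_map_lt String.toList row j "" [] hr]
    simp [hr, pvA_cell, pvB_cell]
  · have : (row.map String.toList).length ≤ j := by simp; omega
    rw [List.getD_eq_default _ _ this]
    simp [hr, pvA_cell, pvB_cell]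

theorem pv_range_split (n : Nat) :
    List.range (n + 4) = [0, 1, 2] ++ (List.range n).map (fun k => 3 + k) ++ [3 + n] := by
  have h : n + 4 = 3 + n + 1 := by omega
  rw [h, List.range_succ, List.range_add]
  rfl

theorem pv_map_range_4 {β : Type} (n : Nat) (f : Nat → β) :
    (List.range (n + 4)).map f =
      [f 0, f 1, f 2] ++ (List.range n).map (fun k => f (3 + k)) ++ [f (3 + n)] := by
  rw [pv_range_split n]
  simp [Function.comp_def]

-- ===== VERDICT (by name: the statement is the Claim_ definition above) =====
theorem format_table_result_py_spec : Claim_equal_format_table_result_py := by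
  intro columns rows _
  unfold Spec_format_table_result_py
  simp only [format_table_result_py, format_table_result_py_alt]
  rw [pv_blocks_range]
  rw [PySem.List.foldl_append_singleton_eq_map]
  set W := pvA_widths columns rows with hWdef
  have hW : W.length = columns.length := pvA_widths_length columns rows
  set n := rows.length with hn
  set B : Nat → List (List Char) :=
    (fun j => pvB_block (columns.getD j "").toList (pvCol rows j)) with hB
  have hcol_len : ∀ j, (pvCol rows j).length = n := by intro j; simp [pvCol, hn]
  have hwid : ∀ j, j < columns.length →
      pvB_width ((columns.getD j "").toList :: pvCol rows j) = W.getD j 0 := by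
    intro j hj; exact pv_width_eq columns rows j hj
  have hget0 : ∀ j, j < columns.length →
      (B j).getD 0 [] = List.replicate (W.getD j 0 + 2) '-' := by
    intro j hj
    show (pvB_block (columns.getD j "").toList (pvCol rows j)).getD 0 [] = _
    rw [pvB_block_expand]
    simp only [List.getD_cons_zero]
    rw [hwid j hj]
  have hget1 : ∀ j, j < columns.length →
      (B j).getD 1 [] = pvB_cell (columns.getD j "").toList (W.getD j 0) := by
    intro j hj
    show (pvB_block (columns.getD j "").toList (pvCol rows j)).getD 1 [] = _
    rw [pvB_block_expand]
    simp only [List.getD_cons_succ, List.getD_cons_zero]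
    rw [hwid j hj]
  have hget2 : ∀ j, j < columns.length →
      (B j).getD 2 [] = List.replicate (W.getD j 0 + 2) '-' := by
    intro j hj
    show (pvB_block (columns.getD j "").toList (pvCol rows j)).getD 2 [] = _
    rw [pvB_block_expand]
    simp only [List.getD_cons_succ, List.getD_cons_zero]
    rw [hwid j hj]
  have hgetlast : ∀ j, j < columns.length →
      (B j).getD (3 + n) [] = List.replicate (W.getD j 0 + 2) '-' := by
    intro j hj
    show (pvB_block (columns.getD j "").toList (pvCol rows j)).getD (3 + n) [] = _
    have := pvB_block_getD_last (columns.getD j "").toList (pvCol rows j)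
    rw [hcol_len j] at this
    rw [this, hwid j hj]
  have hgetdata : ∀ j k, j < columns.length → k < n →
      (B j).getD (3 + k) [] =
        pvB_cell (((rows.getD k []).map String.toList).getD j []) (W.getD j 0) := by
    intro j k hj hk
    show (pvB_block (columns.getD j "").toList (pvCol rows j)).getD (3 + k) [] = _
    rw [pvB_block_getD_data _ _ k (by rw [hcol_len]; exact hk), hwid j hj]
    congr 1
    unfold pvCol
    exact pv_getD_map_lt _ rows k [] [] hk
  -- per-line rewrites
  have hsepmap : ∀ i, (∀ j, j < columns.length →
        (B j).getD i [] = List.replicate (W.getD j 0 + 2) '-') →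
      ((List.range columns.length).map B).map (fun b => b.getD i []) =
        W.map (fun w => List.replicate (w + 2) '-') := by
    intro i h
    rw [List.map_map, pv_map_eq_range 0 _ W, hW]
    apply List.map_congr_left
    intro j hj
    rw [List.mem_range] at hj
    exact h j hj
  have hsep : ∀ i, (i = 0 ∨ i = 2 ∨ i = n + 4 - 1) →
      (∀ j, j < columns.length → (B j).getD i [] = List.replicate (W.getD j 0 + 2) '-') →
      pvB_lineAt ((List.range columns.length).map B) (n + 4) i =
        ['+'] ++ PySem.Chars.join ['+'] (W.map (fun w => List.replicate (w + 2) '-')) ++ ['+'] := by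
    intro i hi h
    simp only [pvB_lineAt]
    rw [if_pos hi, hsepmap i h]
  have hhdr : pvB_lineAt ((List.range columns.length).map B) (n + 4) 1 = pvA_header columns W := by
    simp only [pvB_lineAt]
    rw [if_neg (by omega : ¬ ((1 : Nat) = 0 ∨ (1 : Nat) = 2 ∨ 1 = n + 4 - 1))]
    have hc : ((List.range columns.length).map B).map (fun b => b.getD 1 []) =
        (List.range columns.length).map (fun j => pvB_cell (columns.getD j "").toList (W.getD j 0)) := by
      rw [List.map_map]
      apply List.map_congr_left
      intro j hj
      rw [List.mem_range] at hj
      exact hget1 j hj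
    rw [hc, pv_header_range columns W]
  have hrow : ∀ k, k < n →
      pvB_lineAt ((List.range columns.length).map B) (n + 4) (3 + k) =
        pvA_rowline W (rows.getD k []) := by
    intro k hk
    simp only [pvB_lineAt]
    rw [if_neg (by omega : ¬ (3 + k = 0 ∨ 3 + k = 2 ∨ 3 + k = n + 4 - 1))]
    have hc : ((List.range columns.length).map B).map (fun b => b.getD (3 + k) []) =
        (List.range W.length).map (fun j =>
          pvB_cell (((rows.getD k []).map String.toList).getD j []) (W.getD j 0)) := by
      rw [List.map_map, hW]
      apply List.map_congr_left
      intro j hj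
      rw [List.mem_range] at hj
      exact hgetdata j k hj hk
    rw [hc, ← pv_rowline_range]
  -- assemble
  rw [pv_map_range_4]
  rw [hsep 0 (by omega) hget0, hhdr, hsep 2 (by omega) hget2, hsep (3 + n) (by omega) hgetlast]
  have hmap : (List.range n).map
        (fun k => pvB_lineAt ((List.range columns.length).map B) (n + 4) (3 + k)) =
      rows.map (pvA_rowline W) := by
    rw [pv_map_eq_range [] (pvA_rowline W) rows, ← hn]
    exact List.map_congr_left (fun k hk => hrow k (List.mem_range.mp hk))
  rw [hmap]
  simp [List.append_assoc]
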